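-- pv_equiv track=rewrite | github.com/megbroc7/acta-ai | backend/app/services/content.py | _inject_charts_into_draft
-- ===== SOURCE A (Python) =====
-- def _inject_charts_into_draft(
--     draft_markdown: str,
--     charts: list[dict],
--     rendered_htmls: list[str],
-- ) -> str:
--     """Insert rendered chart HTML blocks into the markdown draft.
--
--     For each chart, finds the H2 heading matching `insert_after_heading`
--     (case-insensitive partial match) and inserts the HTML block after the
--     first paragraph under that heading. Processes in reverse document order
--     to avoid index shifting. Falls back to appending at end if heading not found.
--     """
--     lines = draft_markdown.split("\n")
--
--     # Build insertion plan: list of (line_index, html) — insert AFTER line_index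
--     insertions: list[tuple[int, str]] = []
--
--     for chart, html in zip(charts, rendered_htmls):
--         target_heading = (chart.get("insert_after_heading") or "").lower().strip()
--         if not target_heading:
--             # No heading specified — append at end
--             insertions.append((len(lines) - 1, html))
--             continue
--
--         found = False
--         for i, line in enumerate(lines):
--             stripped = line.strip()
--             # Match H2 headings: "## Something"
--             if stripped.startswith("## "):
--                 heading_text = stripped.lstrip("#").strip().lower()
--                 if target_heading in heading_text or heading_text in target_heading:
--                     # Found the heading — find end of first paragraph after it
--                     # Skip blank lines after heading
--                     j = i + 1
--                     while j < len(lines) and not lines[j].strip():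
--                         j += 1
--                     # Now find the end of the first paragraph (next blank line or next heading)
--                     while j < len(lines) and lines[j].strip() and not lines[j].strip().startswith("#"):
--                         j += 1
--                     # Insert after the paragraph (at position j)
--                     insertions.append((j, html))
--                     found = True
--                     break
--
--         if not found:
--             # Fallback: append at end
--             insertions.append((len(lines), html))
--
--     # Sort by position descending so inserts don't shift earlier indices
--     insertions.sort(key=lambda x: x[0], reverse=True)
--
--     for pos, html in insertions:
--         # Insert as a raw HTML block (blank-line delimited for markdown)
--         html_block = f"\n{html}\n"
--         lines.insert(pos, html_block)
--
--     return "\n".join(lines)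
-- ===== SOURCE B (Python) =====
-- def _inject_charts_into_draft(
--     draft_markdown: str,
--     charts: list[dict],
--     rendered_htmls: list[str],
-- ) -> str:
--     """Single-pass version: precompute stripped lines, H2 headings and
--     paragraph-end jump tables once, group the HTML blocks by insertion
--     position, and emit the result in one pass (no repeated list.insert)."""
--     lines = draft_markdown.split("\n")
--     n = len(lines)
--     stripped = [ln.strip() for ln in lines]
--     # H2 headings (line index, normalized text), in document order
--     headings = [(i, s.lstrip("#").strip().lower())
--                 for i, s in enumerate(stripped) if s.startswith("## ")]
--     # Backward pass: skip2[j] = first j' >= j that is end/blank/'#'-line;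
--     # skip1[j] = skip blanks from j, then run skip2 (= end of first paragraph).
--     skip2 = [n] * (n + 1)
--     skip1 = [n] * (n + 1)
--     for j in range(n - 1, -1, -1):
--         s = stripped[j]
--         skip2[j] = j if (not s or s.startswith("#")) else skip2[j + 1]
--         skip1[j] = skip1[j + 1] if not s else skip2[j]
--     # Group blocks by insertion position
--     groups: dict[int, list[str]] = {}
--     for chart, html in zip(charts, rendered_htmls):
--         target = (chart.get("insert_after_heading") or "").lower().strip()
--         if not target:
--             pos = n - 1
--         else:
--             pos = n
--             for i, h in headings:
--                 if target in h or h in target: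
--                     pos = skip1[i + 1]
--                     break
--         groups.setdefault(pos, []).append(html)
--     # Emit: blocks at a position appear in reverse arrival order, before line k
--     out = []
--     for k in range(n + 1):
--         for html in reversed(groups.get(k, ())):
--             out.append(f"\n{html}\n")
--         if k < n:
--             out.append(lines[k])
--     return "\n".join(out)
-- ===== Notes on version B (the rewrite author's own statement) =====
-- stated objective: alternative
-- what changed: B precomputes stripped lines, the H2 heading list and paragraph-end jump tables in single passes, groups the HTML blocks by insertion position in a dict, and emits the final document in one pass, replacing A's per-chart full-document rescans and its sort-plus-repeated-list.insert application.
import Mathlib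
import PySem

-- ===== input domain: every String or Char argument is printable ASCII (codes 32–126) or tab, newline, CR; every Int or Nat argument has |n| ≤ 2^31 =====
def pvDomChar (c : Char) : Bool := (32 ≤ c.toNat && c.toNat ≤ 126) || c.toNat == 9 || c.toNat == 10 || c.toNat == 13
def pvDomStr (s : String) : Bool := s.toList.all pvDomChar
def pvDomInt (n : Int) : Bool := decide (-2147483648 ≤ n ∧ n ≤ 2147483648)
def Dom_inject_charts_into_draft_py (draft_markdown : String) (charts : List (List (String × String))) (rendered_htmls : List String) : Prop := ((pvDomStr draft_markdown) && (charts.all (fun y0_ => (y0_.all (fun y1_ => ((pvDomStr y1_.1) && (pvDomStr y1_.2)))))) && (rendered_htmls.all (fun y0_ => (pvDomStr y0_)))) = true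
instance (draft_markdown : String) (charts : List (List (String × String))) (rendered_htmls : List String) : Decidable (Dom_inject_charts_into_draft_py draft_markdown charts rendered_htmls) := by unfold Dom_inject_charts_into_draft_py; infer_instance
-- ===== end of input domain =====

-- B groups the HTML blocks by insertion position (headings and paragraph ends
-- precomputed in single passes) and emits the result in one pass, instead of
-- A's per-chart line rescans and repeated list.insert; objective: alternative.

-- ===== PORT A =====
-- shared tiny helpers (both Pythons contain these identical subexpressions)
def pvBlock (html : String) : String := "\n" ++ html ++ "\n"

-- (chart.get("insert_after_heading") or "").lower().strip()
-- ('or ""' turns a missing value into ""; on strings it is the identity otherwise)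
def pvTarget (chart : List (String × String)) : String :=
  PySem.Str.strip (PySem.Str.lower ((List.lookup "insert_after_heading" chart).getD ""))

-- stripped.lstrip("#").strip().lower()   (lstrip("#") ported by hand as
-- dropWhile (· == '#'): Python drops exactly the leading '#' characters)
def pvHeadText (stripped : String) : String :=
  PySem.Str.lower (PySem.Str.strip (String.ofList (stripped.toList.dropWhile (fun c => c == '#'))))

-- target_heading in heading_text or heading_text in target_heading
def pvMatch (target h : String) : Bool := PySem.Str.isIn target h || PySem.Str.isIn h target

-- while j < len(lines) and not lines[j].strip(): j += 1
def pvA_while1 (lines : List String) (j : Nat) : Nat :=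
  if h : j < lines.length ∧ PySem.Str.strip (lines.getD j "") = "" then
    pvA_while1 lines (j + 1)
  else j
termination_by lines.length - j
decreasing_by omega

-- while j < len(lines) and lines[j].strip() and not lines[j].strip().startswith("#"): j += 1
def pvA_while2 (lines : List String) (j : Nat) : Nat :=
  if h : j < lines.length ∧ PySem.Str.strip (lines.getD j "") ≠ "" ∧
      PySem.Str.startswith (PySem.Str.strip (lines.getD j "")) "#" = false then
    pvA_while2 lines (j + 1)
  else j
termination_by lines.length - j
decreasing_by omega

-- for i, line in enumerate(lines): … break   (returns the insertion index, none = not found)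
def pvA_find (lines : List String) (target : String) : List String → Nat → Option Nat
  | [], _ => none
  | line :: rs, i =>
    let stripped := PySem.Str.strip line
    if PySem.Str.startswith stripped "## " then
      if pvMatch target (pvHeadText stripped) then
        some (pvA_while2 lines (pvA_while1 lines (i + 1)))
      else pvA_find lines target rs (i + 1)
    else pvA_find lines target rs (i + 1)

-- the insertion-plan loop over zip(charts, rendered_htmls)
def pvA_insertions (lines : List String) (pairs : List (List (String × String) × String)) :
    List (Int × String) :=
  pairs.foldl (fun acc ch =>
    let target := pvTarget ch.1
    if target = "" then acc ++ [((lines.length : Int) - 1, ch.2)]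
    else
      match pvA_find lines target lines 0 with
      | some j => acc ++ [((j : Int), ch.2)]
      | none => acc ++ [((lines.length : Int), ch.2)]) []

def inject_charts_into_draft_py (draft_markdown : String)
    (charts : List (List (String × String))) (rendered_htmls : List String) : String :=
  -- draft_markdown.split("\n"): sep ≠ "" so split? is never none
  let lines := (PySem.Str.split? draft_markdown "\n").getD []
  let insertions := pvA_insertions lines (charts.zip rendered_htmls)
  let sortedIns := PySem.List.sorted insertions (fun p => p.1) true
  let lines2 := sortedIns.foldl (fun ls ph => PySem.List.insert ls ph.1 (pvBlock ph.2)) lines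
  PySem.Str.join "\n" lines2

-- ===== PORT B =====
-- headings = [(i, s.lstrip("#").strip().lower()) for i, s in enumerate(stripped) if s.startswith("## ")]
def pvB_headings : List String → Int → List (Int × String)
  | [], _ => []
  | s :: rest, i =>
    if PySem.Str.startswith s "## " then (i, pvHeadText s) :: pvB_headings rest (i + 1)
    else pvB_headings rest (i + 1)

-- the backward pass building (skip1[j], skip2[j]) for j = start … n (last entry (n, n))
def pvB_tables : List String → Int → List (Int × Int)
  | [], j => [(j, j)]
  | s :: rest, j =>
    let tbl := pvB_tables rest (j + 1)
    let nxt := tbl.headD (j + 1, j + 1)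
    let sk2 := if s = "" || PySem.Str.startswith s "#" then j else nxt.2
    let sk1 := if s = "" then nxt.1 else sk2
    (sk1, sk2) :: tbl

-- first heading matching target, position skip1[i+1]; fallback n
def pvB_findPos : List (Int × String) → String → List (Int × Int) → Int → Int
  | [], _, _, n => n
  | (i, h) :: rest, target, tbl, n =>
    if pvMatch target h then (PySem.List.pyGetD tbl (i + 1) (n, n)).1
    else pvB_findPos rest target tbl n

-- groups.setdefault(pos, []).append(html) over zip(charts, rendered_htmls)
def pvB_groups (pairs : List (List (String × String) × String))
    (headings : List (Int × String)) (tbl : List (Int × Int)) (n : Int) :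
    PySem.Dict Int (List String) :=
  pairs.foldl (fun d ch =>
    let target := pvTarget ch.1
    let pos := if target = "" then n - 1 else pvB_findPos headings target tbl n
    d.modify pos [] (· ++ [ch.2])) PySem.Dict.empty

-- the emission loop: blocks of position k (reversed) before line k; k = n blocks at the end
def pvB_emit : List String → Int → PySem.Dict Int (List String) → List String
  | [], k, groups => (groups.getD k []).reverse.map pvBlock
  | l :: rest, k, groups =>
    (groups.getD k []).reverse.map pvBlock ++ l :: pvB_emit rest (k + 1) groups

def inject_charts_into_draft_py_alt (draft_markdown : String)
    (charts : List (List (String × String))) (rendered_htmls : List String) : String :=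
  let lines := (PySem.Str.split? draft_markdown "\n").getD []
  let n : Int := lines.length
  let stripped := lines.map PySem.Str.strip
  let headings := pvB_headings stripped 0
  let tbl := pvB_tables stripped 0
  let groups := pvB_groups (charts.zip rendered_htmls) headings tbl n
  PySem.Str.join "\n" (pvB_emit lines 0 groups)

-- ===== PRECONDITION & SPEC =====
def Spec_inject_charts_into_draft_py (draft_markdown : String) (charts : List (List (String × String))) (rendered_htmls : List String) (out : String) : Prop := out = inject_charts_into_draft_py_alt draft_markdown charts rendered_htmls
instance (draft_markdown : String) (charts : List (List (String × String))) (rendered_htmls : List String) (out : String) : Decidable (Spec_inject_charts_into_draft_py draft_markdown charts rendered_htmls out) := by unfold Spec_inject_charts_into_draft_py; infer_instance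

-- ===== CLAIM (what is proved, stated in full; the proofs are below) =====
def Claim_equal_inject_charts_into_draft_py : Prop := ∀ (draft_markdown : String) (charts : List (List (String × String))) (rendered_htmls : List String), Dom_inject_charts_into_draft_py draft_markdown charts rendered_htmls → Spec_inject_charts_into_draft_py draft_markdown charts rendered_htmls (inject_charts_into_draft_py draft_markdown charts rendered_htmls)


-- ===== LEMMAS AND PROOFS =====

-- proof-only helpers
def pvGather (P : List (Int × String)) (k : Int) : List String :=
  (P.filter (fun p => p.1 == k)).map Prod.snd

def pvEmitF : List String → (Int → List String) → List String
  | [], g => g 0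
  | l :: rest, g => g 0 ++ l :: pvEmitF rest (fun k => g (k + 1))

def pvPosA (lines : List String) (ch : List (String × String) × String) : Int :=
  if pvTarget ch.1 = "" then (lines.length : Int) - 1
  else
    match pvA_find lines (pvTarget ch.1) lines 0 with
    | some j => (j : Int)
    | none => (lines.length : Int)

def pvPosB (lines : List String) (ch : List (String × String) × String) : Int :=
  if pvTarget ch.1 = "" then (lines.length : Int) - 1
  else pvB_findPos (pvB_headings (lines.map PySem.Str.strip) 0) (pvTarget ch.1)
        (pvB_tables (lines.map PySem.Str.strip) 0) (lines.length : Int)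

lemma pv_insertBy_eq {α : Type} (before : α → α → Bool) (x : α) (S : List α) :
    PySem.List.insertBy before x S =
      S.takeWhile (fun y => !before x y) ++ x :: S.dropWhile (fun y => !before x y) := by
  induction S with
  | nil => simp [PySem.List.insertBy]
  | cons y ys ih =>
    rw [PySem.List.insertBy]
    by_cases h : before x y
    · simp [h]
    · simp [h, ih]

lemma pv_sorted_append_singleton (P : List (Int × String)) (x : Int × String) :
    PySem.List.sorted (P ++ [x]) (fun p => p.1) true =
      PySem.List.insertBy (fun a b => decide (b.1 < a.1)) x
        (PySem.List.sorted P (fun p => p.1) true) := by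
  rw [PySem.List.sorted_rev_eq_foldl_insertBy, PySem.List.sorted_rev_eq_foldl_insertBy,
    List.foldl_append]
  rfl

lemma pv_dropWhile_lt (x : Int × String) (S : List (Int × String))
    (hp : S.Pairwise (fun a b => b.1 ≤ a.1)) :
    ∀ y ∈ S.dropWhile (fun y => !decide (y.1 < x.1)), y.1 < x.1 := by
  induction S with
  | nil => simp
  | cons z zs ih =>
    rw [List.dropWhile_cons]
    by_cases h : z.1 < x.1
    · simp only [h, decide_true, Bool.not_true, ite_false, Bool.false_eq_true]
      intro y hy
      rcases List.mem_cons.mp hy with hy | hy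
      · exact hy ▸ h
      · have := (List.pairwise_cons.mp hp).1 y hy
        omega
    · simp only [h, decide_false, Bool.not_false, ite_true]
      exact ih (List.pairwise_cons.mp hp).2

lemma pv_go_ne_nil (sep : List Char) :
    ∀ (fuel : Nat) (l cur : List Char) (acc : List (List Char)),
      PySem.Chars.splitOn.go sep fuel l cur acc ≠ [] := by
  intro fuel
  induction fuel with
  | zero => intro l cur acc; simp [PySem.Chars.splitOn.go]
  | succ n ih =>
    intro l cur acc
    cases l with
    | nil => simp [PySem.Chars.splitOn.go]
    | cons c rest =>
      rw [PySem.Chars.splitOn.go]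
      split
      · exact ih _ _ _
      · exact ih _ _ _

lemma pv_lines_ne_nil (s : String) :
    (PySem.Str.split? s "\n").getD [] ≠ [] := by
  simp [PySem.Str.split?, PySem.Chars.split?, PySem.Chars.splitOn]
  intro h
  exact pv_go_ne_nil _ _ _ _ _ h


lemma pvA_while1_le (lines : List String) (j : Nat) (h : j ≤ lines.length) :
    pvA_while1 lines j ≤ lines.length := by
  rw [pvA_while1]
  split_ifs with hc
  · exact pvA_while1_le lines (j + 1) (by omega)
  · exact h
termination_by lines.length - j
decreasing_by omega

lemma pvA_while2_le (lines : List String) (j : Nat) (h : j ≤ lines.length) :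
    pvA_while2 lines j ≤ lines.length := by
  rw [pvA_while2]
  split_ifs with hc
  · exact pvA_while2_le lines (j + 1) (by omega)
  · exact h
termination_by lines.length - j
decreasing_by omega

lemma pvEmitF_congr (l : List String) :
    ∀ (g g' : Int → List String), (∀ m : Nat, g (m : Int) = g' (m : Int)) →
      pvEmitF l g = pvEmitF l g' := by
  induction l with
  | nil => intro g g' h; simpa using h 0
  | cons x rest ih =>
    intro g g' h
    simp only [pvEmitF]
    have h0 : g 0 = g' 0 := by simpa using h 0
    have hr : pvEmitF rest (fun k => g (k + 1)) = pvEmitF rest (fun k => g' (k + 1)) := by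
      apply ih
      intro m
      have := h (m + 1)
      push_cast at this
      exact this
    rw [h0, hr]

lemma pvEmitF_nil_fun (l : List String) :
    ∀ (g : Int → List String), (∀ m : Nat, g (m : Int) = []) → pvEmitF l g = l := by
  induction l with
  | nil => intro g h; simpa using h 0
  | cons x rest ih =>
    intro g h
    simp only [pvEmitF]
    have h0 : g 0 = [] := by simpa using h 0
    have hr : pvEmitF rest (fun k => g (k + 1)) = rest := by
      apply ih
      intro m
      have := h (m + 1)
      push_cast at this
      exact this
    rw [h0, hr]
    simp

lemma pv_insert_cons_pos (x : String) (xs : List String) (q : Int) (b : String)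
    (h1 : 1 ≤ q) (h2 : q ≤ (xs.length : Int) + 1) :
    PySem.List.insert (x :: xs) q b = x :: PySem.List.insert xs (q - 1) b := by
  obtain ⟨m, hm⟩ : ∃ m : Nat, q = (m : Int) + 1 := ⟨(q - 1).toNat, by omega⟩
  subst hm
  rw [show (m : Int) + 1 = ((m + 1 : Nat) : Int) by push_cast; ring]
  rw [PySem.List.insert_natCast _ _ _ (by simp; omega)]
  rw [show ((m + 1 : Nat) : Int) - 1 = ((m : Nat) : Int) by push_cast; ring]
  rw [PySem.List.insert_natCast _ _ _ (by exact_mod_cast (by omega : (m : Int) ≤ xs.length))]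
  simp [List.take_succ_cons, List.drop_succ_cons]

lemma pvGather_append (A B : List (Int × String)) (k : Int) :
    pvGather (A ++ B) k = pvGather A k ++ pvGather B k := by
  simp [pvGather]

lemma pvGather_nil_of_lt (T : List (Int × String)) (q k : Int)
    (hT : ∀ p ∈ T, q ≤ p.1) (hk : k < q) : pvGather T k = [] := by
  simp only [pvGather, List.map_eq_nil_iff, List.filter_eq_nil_iff]
  intro p hp
  have := hT p hp
  simp only [beq_iff_eq]
  omega

lemma pv_dict_fold_getD {β : Type} (f : β → Int) (g : β → String) :
    ∀ (pairs : List β) (d : PySem.Dict Int (List String)) (k : Int),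
      (pairs.foldl (fun d ch => d.modify (f ch) [] (· ++ [g ch])) d).getD k [] =
        d.getD k [] ++ pvGather (pairs.map (fun ch => (f ch, g ch))) k := by
  intro pairs
  induction pairs with
  | nil => intro d k; simp [pvGather]
  | cons ch rest ih =>
    intro d k
    rw [List.foldl_cons, ih]
    by_cases h : k = f ch
    · subst h
      rw [PySem.Dict.getD_modify_self]
      simp [pvGather]
    · rw [PySem.Dict.getD_modify_of_ne _ _ _ h]
      simp [pvGather, Ne.symm h, beq_iff_eq]

lemma pvB_emit_eq (groups : PySem.Dict Int (List String)) :
    ∀ (lines : List String) (k : Int),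
      pvB_emit lines k groups =
        pvEmitF lines (fun m => ((groups.getD (k + m) []).reverse.map pvBlock)) := by
  intro lines
  induction lines with
  | nil => intro k; simp [pvB_emit, pvEmitF]
  | cons l rest ih =>
    intro k
    simp only [pvB_emit, pvEmitF, add_zero]
    rw [ih (k + 1)]
    have he : pvEmitF rest (fun m => ((groups.getD (k + 1 + m) []).reverse.map pvBlock)) =
        pvEmitF rest (fun m => ((groups.getD (k + (m + 1)) []).reverse.map pvBlock)) := by
      apply pvEmitF_congr
      intro m
      rw [show k + 1 + (m : Int) = k + ((m : Int) + 1) by ring]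
    rw [he]

lemma pvB_tables_spec (lines : List String) :
    ∀ (l2 : List String) (j : Nat), l2 = lines.drop j →
      pvB_tables (l2.map PySem.Str.strip) (j : Int) =
        (List.range (l2.length + 1)).map (fun m =>
          (((pvA_while2 lines (pvA_while1 lines (j + m)) : Nat) : Int),
           ((pvA_while2 lines (j + m) : Nat) : Int))) := by
  intro l2
  induction l2 with
  | nil =>
    intro j hj
    have hlen : lines.length ≤ j := by
      have := List.drop_eq_nil_iff.mp hj.symm
      omega
    have hw2 : pvA_while2 lines j = j := by
      rw [pvA_while2]; rw [dif_neg (by omega)]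
    have hw1 : pvA_while1 lines j = j := by
      rw [pvA_while1]; rw [dif_neg (by omega)]
    simp [pvB_tables, List.range_succ, hw1, hw2]
  | cons s rest ih =>
    intro j hj
    have hjlt : j < lines.length := by
      by_contra hge
      rw [List.drop_eq_nil_iff.mpr (by omega)] at hj
      exact (List.cons_ne_nil _ _) hj
    have hsplit : lines.drop j = lines[j] :: lines.drop (j + 1) :=
      (List.getElem_cons_drop hjlt).symm
    rw [hsplit] at hj
    obtain ⟨hs, hrest⟩ : s = lines[j] ∧ rest = lines.drop (j + 1) := by
      constructor <;> [exact (List.cons_eq_cons.mp hj.symm).1.symm;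
        exact (List.cons_eq_cons.mp hj.symm).2.symm]
    have hgd : lines.getD j "" = s := by
      rw [List.getD_eq_getElem lines "" hjlt, hs]
    have ihr := ih (j + 1) hrest
    simp only [List.map_cons, pvB_tables]
    rw [show (j : Int) + 1 = ((j + 1 : Nat) : Int) by push_cast; ring, ihr]
    have hhead : (((List.range (rest.length + 1)).map (fun m =>
        (((pvA_while2 lines (pvA_while1 lines (j + 1 + m)) : Nat) : Int),
         ((pvA_while2 lines (j + 1 + m) : Nat) : Int)))).headD
          (((j + 1 : Nat) : Int), ((j + 1 : Nat) : Int))) =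
        (((pvA_while2 lines (pvA_while1 lines (j + 1)) : Nat) : Int),
         ((pvA_while2 lines (j + 1) : Nat) : Int)) := by
      rw [List.range_succ_eq_map]
      simp
    rw [hhead]
    conv_rhs => rw [List.range_succ_eq_map, List.map_cons, List.map_map]
    have hsk2 : (if (decide (PySem.Str.strip s = "") ||
          PySem.Str.startswith (PySem.Str.strip s) "#") = true then (j : Int)
        else ((pvA_while2 lines (j + 1) : Nat) : Int)) =
        ((pvA_while2 lines j : Nat) : Int) := by
      by_cases hb : PySem.Str.strip s = ""
      · rw [if_pos (by simp [hb])]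
        conv_rhs => rw [pvA_while2]
        rw [hgd, dif_neg (by simp [hb])]
      · by_cases hh : PySem.Str.startswith (PySem.Str.strip s) "#" = true
        · have hh' : PySem.Chars.startswith (PySem.Chars.strip s.toList) ['#'] = true := by
            simpa using hh
          rw [if_pos (by simp [hh'])]
          conv_rhs => rw [pvA_while2]
          rw [hgd, dif_neg (by simp [hh'])]
        · have hh' : PySem.Chars.startswith (PySem.Chars.strip s.toList) ['#'] = false := by
            simpa using Bool.eq_false_iff.mpr hh
          rw [if_neg (by simp [hb, hh'])]
          conv_rhs => rw [pvA_while2]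
          rw [hgd, dif_pos ⟨hjlt, hb, Bool.eq_false_iff.mpr hh⟩]
    have hsk1 : (if PySem.Str.strip s = ""
        then ((pvA_while2 lines (pvA_while1 lines (j + 1)) : Nat) : Int)
        else (if (decide (PySem.Str.strip s = "") ||
            PySem.Str.startswith (PySem.Str.strip s) "#") = true then (j : Int)
          else ((pvA_while2 lines (j + 1) : Nat) : Int))) =
        ((pvA_while2 lines (pvA_while1 lines j) : Nat) : Int) := by
      by_cases hb : PySem.Str.strip s = ""
      · rw [if_pos hb]
        conv_rhs => rw [pvA_while1]
        rw [hgd, dif_pos ⟨hjlt, hb⟩]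
      · rw [if_neg hb]
        conv_rhs => rw [pvA_while1]
        rw [hgd, dif_neg (by simp [hb])]
        exact hsk2
    congr 1
    · simp only [Prod.mk.injEq]
      exact ⟨hsk1, hsk2⟩
    · apply List.map_congr_left
      intro m _
      simp only [Function.comp_apply]
      refine congrArg₂ Prod.mk ?_ ?_
      · exact congrArg (fun x => ((pvA_while2 lines (pvA_while1 lines x) : Nat) : Int)) (by omega)
      · exact congrArg (fun x => ((pvA_while2 lines x : Nat) : Int)) (by omega)

lemma pvB_tables_getD (lines : List String) (m : Nat) (hm : m ≤ lines.length)
    (d : Int × Int) :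
    PySem.List.pyGetD (pvB_tables (lines.map PySem.Str.strip) 0) (m : Int) d =
      (((pvA_while2 lines (pvA_while1 lines m) : Nat) : Int),
       ((pvA_while2 lines m : Nat) : Int)) := by
  have h0 := pvB_tables_spec lines lines 0 (by simp)
  rw [show ((0 : Nat) : Int) = (0 : Int) by simp] at h0
  rw [h0, PySem.List.pyGetD_natCast]
  rw [List.getD_eq_getElem _ _ (by simp; omega)]
  simp

lemma pvA_find_le (lines : List String) (target : String) :
    ∀ (l2 : List String) (i : Nat) (j : Nat), l2 = lines.drop i →
      pvA_find lines target l2 i = some j → j ≤ lines.length := by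
  intro l2
  induction l2 with
  | nil => intro i j _ h; simp [pvA_find] at h
  | cons line rs ih =>
    intro i j hl2 h
    have hilt : i < lines.length := by
      by_contra hge
      rw [List.drop_eq_nil_iff.mpr (by omega)] at hl2
      exact (List.cons_ne_nil _ _) hl2
    have hrs : rs = lines.drop (i + 1) := by
      have := (List.getElem_cons_drop hilt).symm
      rw [this] at hl2
      exact (List.cons_eq_cons.mp hl2).2
    rw [pvA_find] at h
    by_cases h1 : PySem.Str.startswith (PySem.Str.strip line) "## " = true
    · rw [if_pos h1] at h
      by_cases h2 : pvMatch target (pvHeadText (PySem.Str.strip line)) = true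
      · rw [if_pos h2] at h
        have := Option.some.inj h
        subst this
        exact pvA_while2_le lines _ (pvA_while1_le lines _ (by omega))
      · rw [if_neg h2] at h
        exact ih (i + 1) j hrs h
    · rw [if_neg h1] at h
      exact ih (i + 1) j hrs h

lemma pvA_find_eq (lines : List String) (target : String) :
    ∀ (l2 : List String) (i : Nat), l2 = lines.drop i →
      (match pvA_find lines target l2 i with
        | some j => (j : Int)
        | none => (lines.length : Int)) =
      pvB_findPos (pvB_headings (l2.map PySem.Str.strip) (i : Int)) target
        (pvB_tables (lines.map PySem.Str.strip) 0) (lines.length : Int) := by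
  intro l2
  induction l2 with
  | nil => intro i _; simp [pvA_find, pvB_headings, pvB_findPos]
  | cons line rs ih =>
    intro i hl2
    have hilt : i < lines.length := by
      by_contra hge
      rw [List.drop_eq_nil_iff.mpr (by omega)] at hl2
      exact (List.cons_ne_nil _ _) hl2
    have hrs : rs = lines.drop (i + 1) := by
      have := (List.getElem_cons_drop hilt).symm
      rw [this] at hl2
      exact (List.cons_eq_cons.mp hl2).2
    have hcast : (i : Int) + 1 = ((i + 1 : Nat) : Int) := by push_cast; ring
    simp only [List.map_cons, pvB_headings, pvA_find]
    by_cases h1 : PySem.Str.startswith (PySem.Str.strip line) "## " = true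
    · rw [if_pos h1, if_pos h1]
      simp only [pvB_findPos]
      by_cases h2 : pvMatch target (pvHeadText (PySem.Str.strip line)) = true
      · rw [if_pos h2, if_pos h2]
        rw [hcast, pvB_tables_getD lines (i + 1) (by omega)]
      · rw [if_neg h2, if_neg h2, hcast]
        exact ih (i + 1) hrs
    · rw [if_neg h1, if_neg h1, hcast]
      exact ih (i + 1) hrs

lemma pvPos_eq (lines : List String) (ch : List (String × String) × String) :
    pvPosA lines ch = pvPosB lines ch := by
  unfold pvPosA pvPosB
  by_cases hb : pvTarget ch.1 = ""
  · rw [if_pos hb, if_pos hb]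
  · rw [if_neg hb, if_neg hb]
    have := pvA_find_eq lines (pvTarget ch.1) lines 0 (by simp)
    rw [show ((0 : Nat) : Int) = (0 : Int) by simp] at this
    exact this

lemma pvPos_bounds (lines : List String) (hne : lines ≠ [])
    (ch : List (String × String) × String) :
    0 ≤ pvPosA lines ch ∧ pvPosA lines ch ≤ (lines.length : Int) := by
  have hlen : 1 ≤ lines.length := by
    cases lines with
    | nil => exact absurd rfl hne
    | cons a b => simp
  unfold pvPosA
  by_cases hb : pvTarget ch.1 = ""
  · rw [if_pos hb]
    constructor <;> [omega; omega]
  · rw [if_neg hb]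
    cases hf : pvA_find lines (pvTarget ch.1) lines 0 with
    | none => simp
    | some j =>
      have := pvA_find_le lines (pvTarget ch.1) lines 0 j (by simp) hf
      simp
      omega

lemma pvA_insertions_aux (lines : List String) :
    ∀ (pairs : List (List (String × String) × String)) (acc : List (Int × String)),
      pairs.foldl (fun acc ch =>
        let target := pvTarget ch.1
        if target = "" then acc ++ [((lines.length : Int) - 1, ch.2)]
        else
          match pvA_find lines target lines 0 with
          | some j => acc ++ [((j : Int), ch.2)]
          | none => acc ++ [((lines.length : Int), ch.2)]) acc =
      acc ++ pairs.map (fun ch => (pvPosA lines ch, ch.2)) := by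
  intro pairs
  induction pairs with
  | nil => intro acc; simp
  | cons ch rest ih =>
    intro acc
    rw [List.foldl_cons, List.map_cons, ih]
    have hstep : (let target := pvTarget ch.1
        if target = "" then acc ++ [((lines.length : Int) - 1, ch.2)]
        else
          match pvA_find lines target lines 0 with
          | some j => acc ++ [((j : Int), ch.2)]
          | none => acc ++ [((lines.length : Int), ch.2)]) =
        acc ++ [(pvPosA lines ch, ch.2)] := by
      unfold pvPosA
      simp only []
      by_cases hb : pvTarget ch.1 = ""
      · rw [if_pos hb, if_pos hb]
      · rw [if_neg hb, if_neg hb]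
        cases pvA_find lines (pvTarget ch.1) lines 0 <;> rfl
    rw [hstep]
    simp

lemma pvA_insertions_eq (lines : List String)
    (pairs : List (List (String × String) × String)) :
    pvA_insertions lines pairs = pairs.map (fun ch => (pvPosA lines ch, ch.2)) := by
  unfold pvA_insertions
  rw [pvA_insertions_aux]
  simp

lemma pvGather_sorted (P : List (Int × String)) (k : Int) :
    pvGather (PySem.List.sorted P (fun p => p.1) true) k = pvGather P k := by
  induction P using List.reverseRecOn with
  | nil => rfl
  | append_singleton Q x ih =>
    rw [pv_sorted_append_singleton, pv_insertBy_eq]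
    set S := PySem.List.sorted Q (fun p => p.1) true with hS
    have hpair : S.Pairwise (fun a b => b.1 ≤ a.1) :=
      PySem.List.sorted_pairwise_rev Q (fun p => p.1)
    have hTD : S.takeWhile (fun y => !decide (y.1 < x.1)) ++
        S.dropWhile (fun y => !decide (y.1 < x.1)) = S := List.takeWhile_append_dropWhile
    by_cases hk : x.1 = k
    · have hDW : pvGather (S.dropWhile (fun y => !decide (y.1 < x.1))) k = [] := by
        simp only [pvGather, List.map_eq_nil_iff, List.filter_eq_nil_iff]
        intro p hp
        have := pv_dropWhile_lt x S hpair p hp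
        simp only [beq_iff_eq]
        omega
      rw [pvGather_append]
      have hmid : pvGather (x :: S.dropWhile (fun y => !decide (y.1 < x.1))) k =
          x.2 :: pvGather (S.dropWhile (fun y => !decide (y.1 < x.1))) k := by
        simp [pvGather, hk]
      rw [hmid, hDW]
      have hSk : pvGather S k =
          pvGather (S.takeWhile (fun y => !decide (y.1 < x.1))) k := by
        conv_lhs => rw [← hTD]
        rw [pvGather_append, hDW]
        simp
      rw [← hSk, ih]
      simp [pvGather, List.filter_append, hk]
    · rw [pvGather_append]
      have hmid : pvGather (x :: S.dropWhile (fun y => !decide (y.1 < x.1))) k =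
          pvGather (S.dropWhile (fun y => !decide (y.1 < x.1))) k := by
        simp [pvGather, hk]
      rw [hmid, ← pvGather_append, hTD, ih]
      simp [pvGather, List.filter_append, hk]

lemma pvEmitF_length_ge (l : List String) :
    ∀ (g : Int → List String), (l.length : Int) ≤ ((pvEmitF l g).length : Int) := by
  induction l with
  | nil => intro g; simp
  | cons x rest ih =>
    intro g
    simp only [pvEmitF, List.length_cons, List.length_append]
    have := ih (fun k => g (k + 1))
    push_cast at this ⊢
    omega

lemma pv_insert_emitF :
    ∀ (lines : List String) (g : Int → List String) (q : Int) (b : String),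
      0 ≤ q → q ≤ (lines.length : Int) →
      (∀ k : Int, 0 ≤ k → k < q → g k = []) →
      PySem.List.insert (pvEmitF lines g) q b =
        pvEmitF lines (fun k => if k = q then b :: g k else g k) := by
  intro lines
  induction lines with
  | nil =>
    intro g q b h0 hq hg
    have : q = 0 := by simp at hq; omega
    subst this
    simp only [pvEmitF, PySem.List.insert_zero]
    simp
  | cons l rest ih =>
    intro g q b h0 hq hg
    by_cases hq0 : q = 0
    · subst hq0
      simp only [pvEmitF, PySem.List.insert_zero]
      have hshift : pvEmitF rest (fun k => if k + 1 = 0 then b :: g (k + 1) else g (k + 1)) =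
          pvEmitF rest (fun k => g (k + 1)) := by
        apply pvEmitF_congr
        intro m
        rw [if_neg (by omega)]
      rw [hshift]
      simp
    · have hg0 : g 0 = [] := hg 0 le_rfl (by omega)
      simp only [pvEmitF, hg0, List.nil_append]
      rw [pv_insert_cons_pos l _ q b (by omega) (by
        have := pvEmitF_length_ge rest (fun k => g (k + 1))
        simp only [List.length_cons] at hq
        push_cast at hq ⊢
        omega)]
      rw [ih (fun k => g (k + 1)) (q - 1) b (by omega) (by
          simp only [List.length_cons] at hq
          push_cast at hq ⊢
          omega)
        (fun k hk1 hk2 => hg (k + 1) (by omega) (by omega))]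
      rw [if_neg (show ¬(0 : Int) = q from by omega)]
      simp only [List.nil_append]
      congr 1
      apply pvEmitF_congr
      intro m
      by_cases hm : (m : Int) = q - 1
      · rw [if_pos hm, if_pos (by omega)]
      · rw [if_neg hm, if_neg (by omega)]

lemma pv_foldS (lines : List String) :
    ∀ (S : List (Int × String)), S.Pairwise (fun a b => b.1 ≤ a.1) →
      (∀ p ∈ S, 0 ≤ p.1 ∧ p.1 ≤ (lines.length : Int)) →
      S.foldl (fun ls ph => PySem.List.insert ls ph.1 (pvBlock ph.2)) lines =
        pvEmitF lines (fun k => (pvGather S k).reverse.map pvBlock) := by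
  intro S
  induction S using List.reverseRecOn with
  | nil =>
    intro _ _
    simp only [List.foldl_nil]
    rw [pvEmitF_nil_fun]
    intro m
    simp [pvGather]
  | append_singleton T y ih =>
    intro hp hb
    have hpT : T.Pairwise (fun a b => b.1 ≤ a.1) :=
      hp.sublist (List.sublist_append_left T [y])
    have hbT : ∀ p ∈ T, 0 ≤ p.1 ∧ p.1 ≤ (lines.length : Int) :=
      fun p hpm => hb p (List.mem_append_left _ hpm)
    have hyb := hb y (List.mem_append_right _ (List.mem_singleton_self y))
    have hyT : ∀ p ∈ T, y.1 ≤ p.1 := by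
      intro p hpm
      have := List.pairwise_append.mp hp
      exact this.2.2 p hpm y (List.mem_singleton_self y)
    rw [List.foldl_append, List.foldl_cons, List.foldl_nil, ih hpT hbT]
    rw [pv_insert_emitF lines _ y.1 (pvBlock y.2) hyb.1 hyb.2 (by
      intro k hk0 hkq
      have : pvGather T k = [] := pvGather_nil_of_lt T y.1 k hyT hkq
      simp [this])]
    apply pvEmitF_congr
    intro m
    by_cases hm : (m : Int) = y.1
    · rw [if_pos hm]
      have : pvGather (T ++ [y]) (m : Int) = pvGather T (m : Int) ++ [y.2] := by
        rw [pvGather_append]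
        simp [pvGather, hm.symm]
      rw [this]
      simp
    · rw [if_neg hm]
      have : pvGather (T ++ [y]) (m : Int) = pvGather T (m : Int) := by
        rw [pvGather_append]
        have : pvGather [y] (m : Int) = [] := by
          simp [pvGather, List.filter_cons]
          intro h
          exact absurd h.symm hm
        simp [this]
      rw [this]

-- ===== VERDICT (by name: the statement is the Claim_ definition above) =====
set_option maxHeartbeats 1000000 in
theorem inject_charts_into_draft_py_spec : Claim_equal_inject_charts_into_draft_py := by
  intro draft_markdown charts rendered_htmls _hdom
  unfold Spec_inject_charts_into_draft_py
  unfold inject_charts_into_draft_py inject_charts_into_draft_py_alt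
  simp only []
  set lines := (PySem.Str.split? draft_markdown "\n").getD [] with hlines
  have hne : lines ≠ [] := pv_lines_ne_nil draft_markdown
  set pairs := charts.zip rendered_htmls with hpairs
  congr 1
  rw [pvA_insertions_eq]
  have hmap : pairs.map (fun ch => (pvPosA lines ch, ch.2)) =
      pairs.map (fun ch => (pvPosB lines ch, ch.2)) :=
    List.map_congr_left (fun ch _ => by rw [pvPos_eq])
  rw [hmap]
  set P := pairs.map (fun ch => (pvPosB lines ch, ch.2)) with hP
  have hbounds : ∀ p ∈ PySem.List.sorted P (fun p => p.1) true,
      0 ≤ p.1 ∧ p.1 ≤ (lines.length : Int) := by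
    intro p hp
    have hpP : p ∈ P := (PySem.List.mem_sorted _ _ _ _).mp hp
    rw [hP] at hpP
    obtain ⟨ch, _, hch⟩ := List.mem_map.mp hpP
    have hb2 := pvPos_bounds lines hne ch
    rw [pvPos_eq] at hb2
    subst hch
    simpa using hb2
  rw [pv_foldS lines (PySem.List.sorted P (fun p => p.1) true)
    (PySem.List.sorted_pairwise_rev P (fun p => p.1)) hbounds]
  rw [pvB_emit_eq]
  apply pvEmitF_congr
  intro m
  rw [pvGather_sorted]
  simp only [pvB_groups]
  rw [pv_dict_fold_getD
    (fun ch : List (String × String) × String =>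
      if pvTarget ch.1 = "" then (lines.length : Int) - 1
      else pvB_findPos (pvB_headings (lines.map PySem.Str.strip) 0) (pvTarget ch.1)
        (pvB_tables (lines.map PySem.Str.strip) 0) (lines.length : Int))
    (fun ch => ch.2) pairs PySem.Dict.empty]
  rw [show ((PySem.Dict.empty : PySem.Dict Int (List String)).getD (0 + (m : Int)) []) = []
    from rfl]
  rw [List.nil_append, show (0 : Int) + (m : Int) = (m : Int) by ring]
  rfl
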